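-- pv_equiv track=rewrite | github.com/RyanWangZf/BioDSA-deprecated | benchmark_datasets/0_process_cBioPortal.py | _column_names_clean
-- ===== SOURCE A (Python) =====
-- import string
--
-- def _column_names_clean(column_names):
--     cleaned_column_names = []
--     for idx, column_name in enumerate(column_names):
--         try:
--             column_name = str(column_name)
--             column_name = column_name.replace(" ", "_")
--             column_name = column_name.translate(str.maketrans('', '', string.punctuation))
--             cleaned_column_names.append(column_name)
--         except:
--             cleaned_column_names.append(f"column_{idx}")
--     # make the duplicates ones unique by adding "_" and a number
--     cleaned_column_names = [
--         f"{name}_{i}" if cleaned_column_names.count(name) > 1 else name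
--         for i, name in enumerate(cleaned_column_names)
--     ]
--     return cleaned_column_names
-- ===== SOURCE B (Python) =====
-- import string
--
-- def _column_names_clean(column_names):
--     table = str.maketrans('', '', string.punctuation)
--     cleaned = [str(name).replace(" ", "_").translate(table) for name in column_names]
--     srt = sorted(cleaned)
--     dup = {srt[k] for k in range(1, len(srt)) if srt[k] == srt[k - 1]}
--     return [f"{name}_{i}" if name in dup else name for i, name in enumerate(cleaned)]
-- ===== Notes on version B (the rewrite author's own statement) =====
-- stated objective: faster
-- what changed: Detects duplicate cleaned names by sorting a copy once and scanning adjacent equal pairs into a set, instead of A's quadratic cleaned.count(name) rescan for every element.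
import Mathlib
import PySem

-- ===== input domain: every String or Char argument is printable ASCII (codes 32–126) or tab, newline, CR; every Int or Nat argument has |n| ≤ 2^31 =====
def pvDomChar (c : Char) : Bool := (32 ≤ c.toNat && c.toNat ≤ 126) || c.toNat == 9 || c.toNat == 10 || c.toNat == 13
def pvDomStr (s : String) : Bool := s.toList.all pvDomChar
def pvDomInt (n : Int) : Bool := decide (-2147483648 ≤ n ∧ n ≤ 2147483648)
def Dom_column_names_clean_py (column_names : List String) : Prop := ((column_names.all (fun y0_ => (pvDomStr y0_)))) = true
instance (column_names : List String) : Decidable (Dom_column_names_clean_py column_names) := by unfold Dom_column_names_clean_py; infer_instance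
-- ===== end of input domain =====

-- B finds duplicate cleaned names by sorting a copy once and scanning adjacent equal pairs
-- into a set, instead of A's per-element cleaned.count(name) rescan (faster).

-- shared helpers: the cleaning expression and the f-string, identical in both Pythons
-- string.punctuation
def pvPunct : List Char := "!\"#$%&'()*+,-./:;<=>?@[\\]^_`{|}~".toList

-- str(name).replace(" ", "_").translate(str.maketrans('', '', string.punctuation));
-- translate with a delete-only table is exactly a filter dropping the deleted characters
def pvCleanName (s : String) : String :=
  String.mk (((PySem.Str.replace s " " "_").toList).filter (fun ch => !(pvPunct.contains ch)))

-- f"{name}_{i}"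
def pvSuffix (name : String) (i : Int) : String :=
  String.mk (name.toList ++ '_' :: (PySem.Int.toStr i).toList)

-- ===== PORT A =====
-- the try body never raises on a str input, so the except branch is unreachable here
def column_names_clean_py (column_names : List String) : List String :=
  let cleaned := (PySem.List.enumerate column_names).foldl
    (fun acc p => acc ++ [pvCleanName p.2]) []
  (PySem.List.enumerate cleaned).map
    (fun p => if 1 < PySem.List.count cleaned p.2 then pvSuffix p.2 p.1 else p.2)

-- ===== PORT B =====
-- srt = sorted(cleaned); dup = {srt[k] for k in range(1, len(srt)) if srt[k] == srt[k-1]};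
-- the set comprehension is a fold over the range building a PySem.Set (only membership is
-- consumed afterwards); srt[k] / srt[k-1] are in range, ported as pyGetD
def column_names_clean_py_alt (column_names : List String) : List String :=
  let cleaned := column_names.map pvCleanName
  let srt := PySem.List.sorted cleaned (fun x => x) false
  let dup := (PySem.List.pyRange 1 (PySem.List.len srt) 1).foldl
    (fun s k =>
      if PySem.List.pyGetD srt k "" == PySem.List.pyGetD srt (k - 1) ""
      then PySem.Set.add s (PySem.List.pyGetD srt k "") else s)
    PySem.Set.empty
  (PySem.List.enumerate cleaned).map
    (fun p => if PySem.Set.contains dup p.2 then pvSuffix p.2 p.1 else p.2)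

-- ===== PRECONDITION & SPEC =====
def Spec_column_names_clean_py (column_names : List String) (out : List String) : Prop := out = column_names_clean_py_alt column_names
instance (column_names : List String) (out : List String) : Decidable (Spec_column_names_clean_py column_names out) := by unfold Spec_column_names_clean_py; infer_instance

-- ===== CLAIM (what is proved, stated in full; the proofs are below) =====
def Claim_equal_column_names_clean_py : Prop := ∀ (column_names : List String), Dom_column_names_clean_py column_names → Spec_column_names_clean_py column_names (column_names_clean_py column_names)

-- ===== LEMMAS AND PROOFS =====

-- A's first loop is exactly map pvCleanName
theorem pv_cleanA (xs : List String) :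
    (PySem.List.enumerate xs).foldl (fun acc p => acc ++ [pvCleanName p.2]) ([] : List String)
      = xs.map pvCleanName := by
  have h1 : (PySem.List.enumerate xs).foldl (fun acc p => acc ++ [pvCleanName p.2]) ([] : List String)
      = ((PySem.List.enumerate xs).map (·.2)).foldl (fun acc x => acc ++ [pvCleanName x]) [] :=
    by rw [List.foldl_map]
  rw [h1, PySem.List.map_snd_enumerate, PySem.List.foldl_append_singleton_eq_map,
    List.nil_append]

-- membership in the set built by B's filtered comprehension fold
theorem pv_mem_dupFold (srt : List String) (l : List Int) (s : PySem.Set String) (x : String) :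
    x ∈ l.foldl
      (fun s k =>
        if PySem.List.pyGetD srt k "" == PySem.List.pyGetD srt (k - 1) ""
        then PySem.Set.add s (PySem.List.pyGetD srt k "") else s) s ↔
      x ∈ s ∨ ∃ k ∈ l, PySem.List.pyGetD srt k "" = PySem.List.pyGetD srt (k - 1) ""
        ∧ PySem.List.pyGetD srt k "" = x := by
  induction l generalizing s with
  | nil => simp
  | cons a t ih =>
    simp only [List.foldl_cons]
    by_cases h : PySem.List.pyGetD srt a "" = PySem.List.pyGetD srt (a - 1) ""
    · rw [if_pos (by simpa using h), ih, PySem.Set.mem_add]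
      constructor
      · rintro (⟨hs | hx⟩ | ⟨k, hk, hc, he⟩)
        · exact Or.inl hs
        · exact Or.inr ⟨a, by simp, h, hx.symm⟩
        · exact Or.inr ⟨k, by simp [hk], hc, he⟩
      · rintro (hs | ⟨k, hk, hc, he⟩)
        · exact Or.inl (Or.inl hs)
        · rcases List.mem_cons.mp hk with rfl | hk
          · exact Or.inl (Or.inr he.symm)
          · exact Or.inr ⟨k, hk, hc, he⟩
    · rw [if_neg (by simpa using h), ih]
      constructor
      · rintro (hs | ⟨k, hk, hc, he⟩)
        · exact Or.inl hs
        · exact Or.inr ⟨k, by simp [hk], hc, he⟩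
      · rintro (hs | ⟨k, hk, hc, he⟩)
        · exact Or.inl hs
        · rcases List.mem_cons.mp hk with rfl | hk
          · exact absurd hc h
          · exact Or.inr ⟨k, hk, hc, he⟩

-- in a chain-sorted list, an adjacent equal pair with value x exists iff x occurs at least twice
theorem pv_adj_iff_count (ss : List String) (h : ss.Pairwise (· ≤ ·)) (x : String) :
    (∃ k : Nat, k + 1 < ss.length ∧ ss[k]! = x ∧ ss[k+1]! = x) ↔ 2 ≤ ss.count x := by
  induction ss with
  | nil => simp
  | cons a t ih =>
    have ha : ∀ b ∈ t, a ≤ b := (List.pairwise_cons.mp h).1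
    have ht : t.Pairwise (· ≤ ·) := (List.pairwise_cons.mp h).2
    by_cases hb : (x == a) = true
    · have hax : a = x := (eq_of_beq hb).symm
      have hcnt : (a :: t).count x = t.count x + 1 := by simp [hax]
      rw [hcnt]
      constructor
      · rintro ⟨k, hk, h0, h1⟩
        match k with
        | 0 =>
          have htlen : 0 < t.length := by simp [List.length_cons] at hk; omega
          have htx : t[0]! = x := by simpa [List.getElem!_cons_succ] using h1
          have hmem : x ∈ t := by
            rw [← htx, getElem!_pos t 0 htlen]; exact List.getElem_mem htlen
          have := List.one_le_count_iff.mpr hmem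
          omega
        | k + 1 =>
          have hk' : k + 1 < t.length := by simp [List.length_cons] at hk; omega
          have h0' : t[k]! = x := by simpa [List.getElem!_cons_succ] using h0
          have h1' : t[k+1]! = x := by simpa [List.getElem!_cons_succ] using h1
          have := (ih ht).mp ⟨k, hk', h0', h1'⟩
          omega
      · intro hc
        have htc : 1 ≤ t.count x := by omega
        have hmem : x ∈ t := List.one_le_count_iff.mp htc
        obtain ⟨j, hj, hjx⟩ := List.mem_iff_getElem.mp hmem
        have htlen : 0 < t.length := Nat.lt_of_le_of_lt (Nat.zero_le j) hj
        have h0le : t[0] ≤ t[j] := by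
          rcases Nat.eq_zero_or_pos j with rfl | hjpos
          · exact le_refl _
          · exact List.pairwise_iff_getElem.mp ht 0 j htlen hj hjpos
        have hx0 : t[0] = x := le_antisymm (hjx ▸ h0le) (hax ▸ ha t[0] (List.getElem_mem htlen))
        refine ⟨0, by simp [List.length_cons]; omega, ?_, ?_⟩
        · simpa [List.getElem!_cons_zero] using hax
        · rw [List.getElem!_cons_succ, getElem!_pos t 0 htlen]; exact hx0
    · have hax : a ≠ x := fun he => hb (by simp [he])
      have hcnt : (a :: t).count x = t.count x := by simp [hax]
      rw [hcnt, ← ih ht]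
      constructor
      · rintro ⟨k, hk, h0, h1⟩
        match k with
        | 0 =>
          have : a = x := by simpa [List.getElem!_cons_zero] using h0
          exact absurd this hax
        | k + 1 =>
          exact ⟨k, by simp [List.length_cons] at hk; omega,
            by simpa [List.getElem!_cons_succ] using h0,
            by simpa [List.getElem!_cons_succ] using h1⟩
      · rintro ⟨k, hk, h0, h1⟩
        exact ⟨k + 1, by simp [List.length_cons]; omega,
          by simpa [List.getElem!_cons_succ] using h0,
          by simpa [List.getElem!_cons_succ] using h1⟩

-- B's dup set holds exactly the names occurring more than once in cleaned
theorem pv_dup_iff (cleaned : List String) (x : String) :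
    (x ∈ (PySem.List.pyRange 1 (PySem.List.len (PySem.List.sorted cleaned (fun x => x) false)) 1).foldl
      (fun s k =>
        if PySem.List.pyGetD (PySem.List.sorted cleaned (fun x => x) false) k ""
            == PySem.List.pyGetD (PySem.List.sorted cleaned (fun x => x) false) (k - 1) ""
        then PySem.Set.add s (PySem.List.pyGetD (PySem.List.sorted cleaned (fun x => x) false) k "") else s)
      PySem.Set.empty) ↔ 2 ≤ cleaned.count x := by
  set srt := PySem.List.sorted cleaned (fun x => x) false with hsrt
  have hperm : srt.Perm cleaned := PySem.List.sorted_perm cleaned _ _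
  have hpw : srt.Pairwise (· ≤ ·) := by
    have := PySem.List.sorted_pairwise cleaned (fun x => x) (κ := String)
    simpa [hsrt] using this
  rw [pv_mem_dupFold, ← hperm.count_eq, ← pv_adj_iff_count srt hpw x]
  constructor
  · rintro (hs | ⟨k, hk, hc, he⟩)
    · simp [PySem.Set.empty] at hs
    · obtain ⟨h1, h2⟩ := PySem.List.mem_pyRange_one.mp hk
      rw [PySem.List.len_eq] at h2
      obtain ⟨j, rfl⟩ := Int.eq_ofNat_of_zero_le (by omega : (0:Int) ≤ k)
      have hj1 : 1 ≤ j := by exact_mod_cast h1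
      have hjlt : j < srt.length := by exact_mod_cast h2
      have ej : PySem.List.pyGetD srt ((j : Nat) : Int) "" = srt[j] := by
        rw [PySem.List.pyGetD_eq_getElem srt "" (by omega) (by exact_mod_cast hjlt)]
        simp
      have hc1 : ((j : Nat) : Int) - 1 = ((j - 1 : Nat) : Int) := by omega
      have ej' : PySem.List.pyGetD srt (((j : Nat) : Int) - 1) "" = srt[j - 1] := by
        rw [hc1, PySem.List.pyGetD_eq_getElem srt "" (by omega)
          (by exact_mod_cast (show j - 1 < srt.length by omega))]
        simp
      refine ⟨j - 1, by omega, ?_, ?_⟩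
      · rw [getElem!_pos srt (j - 1) (by omega), ← ej', ← hc]; exact he
      · have hj0 : j - 1 + 1 = j := by omega
        rw [hj0, getElem!_pos srt j hjlt, ← ej]; exact he
  · rintro ⟨k, hk, h0, h1⟩
    have h0' : srt[k] = x := by rw [getElem!_pos srt k (by omega)] at h0; exact h0
    have h1' : srt[k+1] = x := by rw [getElem!_pos srt (k+1) hk] at h1; exact h1
    have ek1 : PySem.List.pyGetD srt ((k + 1 : Nat) : Int) "" = srt[k+1] := by
      rw [PySem.List.pyGetD_eq_getElem srt "" (by omega) (by exact_mod_cast hk)]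
      simp
    have hc1 : ((k + 1 : Nat) : Int) - 1 = ((k : Nat) : Int) := by omega
    have ek0 : PySem.List.pyGetD srt ((k : Nat) : Int) "" = srt[k] := by
      rw [PySem.List.pyGetD_eq_getElem srt "" (by omega)
        (by exact_mod_cast (show k < srt.length by omega))]
      simp
    refine Or.inr ⟨((k + 1 : Nat) : Int), ?_, ?_, ?_⟩
    · rw [PySem.List.mem_pyRange_one, PySem.List.len_eq]
      refine ⟨by omega, ?_⟩
      exact_mod_cast hk
    · rw [ek1, hc1, ek0, h0', h1']
    · rw [ek1, h1']

theorem pv_main (xs : List String) :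
    column_names_clean_py xs = column_names_clean_py_alt xs := by
  simp only [column_names_clean_py, column_names_clean_py_alt]
  rw [pv_cleanA]
  set cleaned := xs.map pvCleanName with hcl
  congr 1
  funext p
  have hcon : ∀ (D : PySem.Set String) (y : String), (PySem.Set.contains D y = true) ↔ y ∈ D :=
    fun D y => by simp [PySem.Set.contains]
  have hiff : (PySem.Set.contains
      ((PySem.List.pyRange 1 (PySem.List.len (PySem.List.sorted cleaned (fun x => x) false)) 1).foldl
        (fun s k =>
          if PySem.List.pyGetD (PySem.List.sorted cleaned (fun x => x) false) k ""
              == PySem.List.pyGetD (PySem.List.sorted cleaned (fun x => x) false) (k - 1) ""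
          then PySem.Set.add s (PySem.List.pyGetD (PySem.List.sorted cleaned (fun x => x) false) k "") else s)
        PySem.Set.empty) p.2 = true) ↔ 1 < PySem.List.count cleaned p.2 := by
    rw [hcon, pv_dup_iff cleaned p.2, PySem.List.count_eq]
    omega
  by_cases h : 1 < PySem.List.count cleaned p.2
  · rw [if_pos h, if_pos (hiff.mpr h)]
  · rw [if_neg h, if_neg (fun hc => h (hiff.mp hc))]

-- ===== VERDICT (by name: the statement is the Claim_ definition above) =====
theorem column_names_clean_py_spec : Claim_equal_column_names_clean_py := by
  intro xs _
  unfold Spec_column_names_clean_py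
  exact pv_main xs
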